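-- pv_equiv track=rewrite | github.com/chrisjbryant/lmgec-lite | lmgec.py | generateCands
-- ===== SOURCE A (Python) =====
-- def generateCands(tok_id, cands, sent, weight):
-- 	# Save candidates here.
-- 	edit_dict = {}
-- 	# Loop through the input alternative candidates
-- 	for cand in cands:
-- 		# Copy the input sentence
-- 		new_sent = sent[:]
-- 		# Change the target token with the current cand
-- 		new_sent[tok_id] = cand
-- 		# Remove empty strings from the list (for deletions)
-- 		new_sent = list(filter(None, new_sent))
-- 		# Give the edit a unique identifier
-- 		edit_id = (tok_id, cand, weight)
-- 		# Save non-empty sentences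
-- 		if new_sent: edit_dict[edit_id] = new_sent
-- 	return edit_dict
-- ===== SOURCE B (Python) =====
-- def generateCands(tok_id, cands, sent, weight):
--     i = tok_id if tok_id >= 0 else tok_id + len(sent)
--     # Filter the unchanged parts of the sentence a single time.
--     prefix = [w for w in sent[:i] if w]
--     suffix = [w for w in sent[i + 1:] if w]
--     edit_dict = {}
--     for cand in cands:
--         new_sent = prefix + ([cand] if cand else []) + suffix
--         if new_sent:
--             edit_dict[(tok_id, cand, weight)] = new_sent
--     return edit_dict
-- ===== Notes on version B (the rewrite author's own statement) =====
-- stated objective: alternative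
-- what changed: B validates the index once, filters the unchanged prefix and suffix of the sentence a single time, and builds each candidate sentence as prefix + [cand] + suffix, instead of A's per-candidate copy-substitute-refilter of the whole sentence.
import Mathlib
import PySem

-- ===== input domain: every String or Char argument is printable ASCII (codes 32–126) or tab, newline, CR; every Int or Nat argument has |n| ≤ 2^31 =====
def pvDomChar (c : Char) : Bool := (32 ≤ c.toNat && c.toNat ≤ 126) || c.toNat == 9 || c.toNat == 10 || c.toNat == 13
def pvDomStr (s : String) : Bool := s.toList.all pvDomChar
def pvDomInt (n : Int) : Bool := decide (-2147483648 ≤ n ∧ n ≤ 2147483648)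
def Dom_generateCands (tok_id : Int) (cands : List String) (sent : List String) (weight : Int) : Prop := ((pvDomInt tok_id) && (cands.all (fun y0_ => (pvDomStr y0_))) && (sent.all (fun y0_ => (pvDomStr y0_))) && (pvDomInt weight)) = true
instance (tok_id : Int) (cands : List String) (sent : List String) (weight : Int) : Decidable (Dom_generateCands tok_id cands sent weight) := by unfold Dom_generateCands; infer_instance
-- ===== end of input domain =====

-- B filters the unchanged prefix/suffix of the sentence once instead of re-filtering the
-- whole substituted sentence for every candidate (objective: alternative decomposition).

-- ===== PORT A =====
-- A's loop body: copy sent, assign new_sent[tok_id] = cand (pySetD is exact under the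
-- in-range precondition Pre_), filter out empty strings, insert into the dict if non-empty.
def generateCands (tok_id : Int) (cands : List String) (sent : List String) (weight : Int) : List (Int × String × Int × List String) :=
  (cands.foldl (fun (d : PySem.Dict (Int × String × Int) (List String)) cand =>
      let new_sent := PySem.List.pySetD sent tok_id cand
      let new_sent := new_sent.filter (fun w => !(w == ""))
      if new_sent ≠ [] then d.insert (tok_id, cand, weight) new_sent else d)
    PySem.Dict.empty).items.map (fun p => (p.1.1, p.1.2.1, p.1.2.2, p.2))

-- ===== PORT B =====
def generateCands_alt (tok_id : Int) (cands : List String) (sent : List String) (weight : Int) : List (Int × String × Int × List String) :=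
  let i : Int := if tok_id ≥ 0 then tok_id else tok_id + sent.length
  let pre := (PySem.List.slice sent none (some i)).filter (fun w => !(w == ""))
  let suf := (PySem.List.slice sent (some (i + 1)) none).filter (fun w => !(w == ""))
  (cands.foldl (fun (d : PySem.Dict (Int × String × Int) (List String)) cand =>
      let new_sent := pre ++ (if !(cand == "") then [cand] else []) ++ suf
      if new_sent ≠ [] then d.insert (tok_id, cand, weight) new_sent else d)
    PySem.Dict.empty).items.map (fun p => (p.1.1, p.1.2.1, p.1.2.2, p.2))

-- ===== PRECONDITION & SPEC =====
-- A raises IndexError (list assignment out of range) iff the loop runs with an out-of-range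
-- tok_id; with empty cands the loop never runs and A returns {} for any tok_id.
def Pre_generateCands (tok_id : Int) (cands : List String) (sent : List String) (weight : Int) : Prop :=
  cands ≠ [] → PySem.Raise.InRange sent.length tok_id
instance (tok_id : Int) (cands : List String) (sent : List String) (weight : Int) : Decidable (Pre_generateCands tok_id cands sent weight) := by unfold Pre_generateCands; infer_instance
def pvWitness_generateCands : Int × List String × List String × Int := (1, ["x", ""], ["a", "b", "c"], 2)
def Spec_generateCands (tok_id : Int) (cands : List String) (sent : List String) (weight : Int) (out : List (Int × String × Int × List String)) : Prop := out = generateCands_alt tok_id cands sent weight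
instance (tok_id : Int) (cands : List String) (sent : List String) (weight : Int) (out : List (Int × String × Int × List String)) : Decidable (Spec_generateCands tok_id cands sent weight out) := by unfold Spec_generateCands; infer_instance

-- ===== CLAIM (what is proved, stated in full; the proofs are below) =====
def Claim_equal_generateCands : Prop := ∀ (tok_id : Int) (cands : List String) (sent : List String) (weight : Int), Dom_generateCands tok_id cands sent weight → Pre_generateCands tok_id cands sent weight → Spec_generateCands tok_id cands sent weight (generateCands tok_id cands sent weight)

-- ===== LEMMAS AND PROOFS =====

-- Python's negative-index assignment: for an in-range negative index it sets slot i+len.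
theorem pySetD_neg (xs : List String) (i : Int) (v : String) (h : i < 0) (h2 : 0 ≤ i + xs.length) :
    PySem.List.pySetD xs i v = xs.set (i + xs.length).toNat v := by
  unfold PySem.List.pySetD PySem.List.pySet? PySem.List.pyIdx?
  split_ifs <;> simp_all <;> (congr 1; omega)

-- The heart of the equivalence: filtering the substituted sentence equals
-- filtered-prefix ++ (kept candidate) ++ filtered-suffix, at the effective index.
theorem filter_set (sent : List String) (tok_id : Int) (cand : String)
    (h : PySem.Raise.InRange sent.length tok_id) :
    (PySem.List.pySetD sent tok_id cand).filter (fun w => !(w == "")) =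
      (PySem.List.slice sent none (some (if tok_id ≥ 0 then tok_id else tok_id + sent.length))).filter (fun w => !(w == ""))
      ++ (if !(cand == "") then [cand] else [])
      ++ (PySem.List.slice sent (some ((if tok_id ≥ 0 then tok_id else tok_id + sent.length) + 1)) none).filter (fun w => !(w == "")) := by
  unfold PySem.Raise.InRange at h
  set i : Int := if tok_id ≥ 0 then tok_id else tok_id + sent.length with hi
  have hi0 : 0 ≤ i := by rw [hi]; split_ifs <;> omega
  have hilt : i < sent.length := by rw [hi]; split_ifs <;> omega
  have hset : PySem.List.pySetD sent tok_id cand = sent.set i.toNat cand := by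
    by_cases hp : tok_id ≥ 0
    · rw [PySem.List.pySetD_of_nonneg sent cand hp]; rw [hi]; simp [hp]
    · rw [pySetD_neg sent tok_id cand (by omega) (by omega)]; rw [hi]; simp [hp]
  have hlt : i.toNat < sent.length := by omega
  rw [hset, List.set_eq_take_cons_drop cand hlt,
      PySem.List.slice_to sent hi0, PySem.List.slice_from sent (by omega : (0:Int) ≤ i + 1)]
  have : (i + 1).toNat = i.toNat + 1 := by omega
  rw [this]
  simp [List.filter_append]
  split_ifs <;> simp_all

theorem generateCands_spec' (tok_id : Int) (cands : List String) (sent : List String) (weight : Int)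
    (hpre : Pre_generateCands tok_id cands sent weight) :
    generateCands tok_id cands sent weight = generateCands_alt tok_id cands sent weight := by
  unfold generateCands generateCands_alt
  rcases eq_or_ne cands [] with rfl | hc
  · rfl
  · have h := hpre hc
    congr 2
    apply PySem.List.foldl_congr_mem
    intro d cand _
    simp only [filter_set sent tok_id cand h, List.append_assoc]

-- ===== VERDICT (by name: the statement is the Claim_ definition above) =====
theorem generateCands_spec : Claim_equal_generateCands := by
  intro tok_id cands sent weight _ hpre
  exact generateCands_spec' tok_id cands sent weight hpre
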